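-- pv_equiv track=rewrite | github.com/amanuellperez/mcu_pc_tools | src/ttf2txt/ttf_txt2bin.py | j_index_of_right_column_to_delete
-- ===== SOURCE A (Python) =====
-- def column_has_char(x, j, c):
--
--     for i in range(len(x)):
--         if (x[i][j] == c):
--             return True
--
--     return False
--
-- def j_index_of_right_column_to_delete(char):
--
--     jblank = -1     # columna a borrar
--     for k in range(len(char)):
--         j = 0   # la primera columna es -1
--         while(column_has_char(char[k], -(j + 1), '1') == False):
--             j += 1
--             if (j + 1 == len(char[k][0])):  # El space son todo blancos
--                 break
--
--         if (k == 0):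
--             jblank = j
--
--         else:
--             if (jblank > j):
--                 jblank = j
--
--     return jblank
-- ===== SOURCE B (Python) =====
-- def _trail(row):
--     # length of the run of entries after the last '1' (counted from the right end)
--     for k, c in enumerate(reversed(row)):
--         if c == '1':
--             return k
--     return len(row)
--
-- def j_index_of_right_column_to_delete(char):
--     best = None
--     for grid in char:
--         t = min([len(grid[0]) - 1] + [_trail(row) for row in grid])
--         best = t if best is None else min(best, t)
--     return -1 if best is None else best
-- ===== Notes on version B (the rewrite author's own statement) =====
-- stated objective: simpler
-- what changed: Replaces A's column-by-column right-to-left negative-index scan with its cap-and-break while loop by a row-major pass: each row's trailing run after its last '1', a grid value min(width-1, trails), and a running min over grids.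
import Mathlib
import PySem

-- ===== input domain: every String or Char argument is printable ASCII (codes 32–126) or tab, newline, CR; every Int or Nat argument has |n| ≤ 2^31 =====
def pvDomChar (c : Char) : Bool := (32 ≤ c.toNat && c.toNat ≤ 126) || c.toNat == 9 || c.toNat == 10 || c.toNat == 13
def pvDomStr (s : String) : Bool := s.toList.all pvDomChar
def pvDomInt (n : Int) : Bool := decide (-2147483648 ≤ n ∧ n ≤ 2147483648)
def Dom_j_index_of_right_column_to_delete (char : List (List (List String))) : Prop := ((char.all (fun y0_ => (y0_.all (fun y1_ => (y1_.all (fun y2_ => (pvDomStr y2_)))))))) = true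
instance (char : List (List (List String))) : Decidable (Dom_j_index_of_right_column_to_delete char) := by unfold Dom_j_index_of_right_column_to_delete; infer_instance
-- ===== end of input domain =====

-- B is a simpler row-major pass (each row's trailing run after its last '1', then a min with
-- width-1) replacing A's column-by-column negative-index while loop; equivalence is about the
-- return value only.

-- ===== PORT A =====
def column_has_char (x : List (List String)) (j : Int) (c : String) : Bool :=
  match x with
  | [] => false
  | row :: rest =>
    if PySem.List.pyGet? row j = some c then true
    else column_has_char rest j c

-- A's while loop; fuel bounds the iterations (on every input admitted by Pre_ the loop
-- exits before the fuel runs out, so this is exact there)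
def pvAWhile (x : List (List String)) (w : Int) : Nat → Int → Int
  | 0, j => j
  | fuel + 1, j =>
    if column_has_char x (-(j + 1)) "1" = false then
      if (j + 1) + 1 = w then j + 1
      else pvAWhile x w fuel (j + 1)
    else j

def pvAGo : List (List (List String)) → Nat → Int → Int
  | [], _, jblank => jblank
  | g :: rest, k, jblank =>
    let w : Int := ((g.headD []).length : Int)
    let j := pvAWhile g w (w.toNat + 1) 0
    let jblank' := if k = 0 then j else if jblank > j then j else jblank
    pvAGo rest (k + 1) jblank'

def j_index_of_right_column_to_delete (char : List (List (List String))) : Int :=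
  pvAGo char 0 (-1)

-- ===== PORT B =====
-- _trail: scan of enumerate(reversed(row)); returns len(row) when the row has no '1'
def pvTrailAux (len : Int) : List String → Int → Int
  | [], _ => len
  | c :: rest, k => if c = "1" then k else pvTrailAux len rest (k + 1)

def pvTrail (row : List String) : Int :=
  pvTrailAux (row.length : Int) row.reverse 0

-- loop body of B's fold over the grids; min([cap] + trails) is the running-min fold
def pvBStep (best : Option Int) (g : List (List String)) : Option Int :=
  let t := (g.map pvTrail).foldl min (((g.headD []).length : Int) - 1)
  some (match best with | none => t | some b => min b t)

def j_index_of_right_column_to_delete_alt (char : List (List (List String))) : Int :=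
  (char.foldl pvBStep none).getD (-1)

-- ===== PRECONDITION & SPEC =====
-- spec-side row measure: length of the run of non-'1' entries at the right end of a row
-- (= the row's length when it has no '1'); these helpers are library-only, not the ports
def pvTrN (row : List String) : Nat := row.reverse.idxOf "1"

def pvMinTr (g : List (List String)) : Nat :=
  (PySem.List.min? (g.map pvTrN) (fun x => x)).getD 0

-- the first row whose trailing run is minimal must really carry a '1' there
def pvFindOk (g : List (List String)) : Bool :=
  match g.find? (fun r => pvTrN r == pvMinTr g) with
  | some row => decide (pvMinTr g < row.length)
  | none => false

def pvGridPre (g : List (List String)) : Prop :=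
  g ≠ [] ∧
    ((2 ≤ (g.headD []).length ∧ (g.headD []).length - 1 ≤ pvMinTr g) ∨
     (1 ≤ (g.headD []).length ∧ pvMinTr g ≤ (g.headD []).length - 2 ∧ pvFindOk g = true))

-- Pre_ excludes exactly the inputs on which A raises IndexError (an empty grid, a zero-width
-- first row, or a row that is too short for the columns A's right-to-left scan reaches
-- before it stops); on every input admitted here A returns normally.
def Pre_j_index_of_right_column_to_delete (char : List (List (List String))) : Prop :=
  ∀ g ∈ char, pvGridPre g
instance (char : List (List (List String))) : Decidable (Pre_j_index_of_right_column_to_delete char) := by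
  unfold Pre_j_index_of_right_column_to_delete pvGridPre; infer_instance

def pvWitness_j_index_of_right_column_to_delete : List (List (List String)) :=
  [[["1", "0"], ["0", "1"]], [["0", "1", " "], ["1", "0", " "]]]

def Spec_j_index_of_right_column_to_delete (char : List (List (List String))) (out : Int) : Prop := out = j_index_of_right_column_to_delete_alt char
instance (char : List (List (List String))) (out : Int) : Decidable (Spec_j_index_of_right_column_to_delete char out) := by unfold Spec_j_index_of_right_column_to_delete; infer_instance

-- ===== CLAIM (what is proved, stated in full; the proofs are below) =====
def Claim_equal_j_index_of_right_column_to_delete : Prop := ∀ (char : List (List (List String))), Dom_j_index_of_right_column_to_delete char → Pre_j_index_of_right_column_to_delete char → Spec_j_index_of_right_column_to_delete char (j_index_of_right_column_to_delete char)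

-- ===== LEMMAS AND PROOFS =====

theorem pv_idxOf_le {l : List String} {i : Nat} (h : l[i]? = some "1") :
    l.idxOf "1" ≤ i := by
  induction l generalizing i with
  | nil => simp at h
  | cons x t ih =>
    cases i with
    | zero =>
      simp at h
      simp [h]
    | succ n =>
      simp at h
      by_cases hx : x = "1"
      · simp [hx]
      · rw [List.idxOf_cons_ne _ (by simpa using hx)]
        exact Nat.succ_le_succ (ih h)

theorem pvTrailAux_eq (len : Int) (l : List String) (k : Int) :
    pvTrailAux len l k = if "1" ∈ l then k + (l.idxOf "1" : Int) else len := by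
  induction l generalizing k with
  | nil => simp [pvTrailAux]
  | cons c t ih =>
    by_cases hc : c = "1"
    · subst hc
      simp [pvTrailAux]
    · rw [List.idxOf_cons_ne _ (by simpa using hc)]
      simp only [pvTrailAux, hc, if_false, ih, List.mem_cons]
      by_cases hm : "1" ∈ t
      · simp [hm, Ne.symm hc]
        ring
      · simp [hm, Ne.symm hc]

theorem pvTrail_eq_trN (row : List String) : pvTrail row = ((pvTrN row : Nat) : Int) := by
  rw [pvTrail, pvTrailAux_eq]
  by_cases h : "1" ∈ row.reverse
  · simp [h, pvTrN]
  · rw [if_neg h]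
    unfold pvTrN
    rw [List.idxOf_eq_length h]
    simp

theorem pvTrN_le_length (row : List String) : pvTrN row ≤ row.length := by
  unfold pvTrN
  simpa using List.idxOf_le_length (a := "1") (l := row.reverse)

theorem pvTrN_get {row : List String} (h : pvTrN row < row.length) :
    row[row.length - 1 - pvTrN row]? = some "1" := by
  have hrev : "1" ∈ row.reverse := by
    by_contra habs
    have := List.idxOf_eq_length habs
    unfold pvTrN at h
    rw [this] at h
    simp at h
  have hlt : row.reverse.idxOf "1" < row.reverse.length := List.idxOf_lt_length_of_mem hrev
  have hget : row.reverse[row.reverse.idxOf "1"]? = some "1" := by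
    rw [List.getElem?_eq_getElem hlt]
    simp [List.getElem_idxOf]
  have hlt' : row.reverse.idxOf "1" < row.length := by simpa using hlt
  rw [List.getElem?_reverse hlt'] at hget
  exact hget

theorem pvTrN_ub {row : List String} {jn : Nat} (h : jn < pvTrN row)
    (hjn : jn < row.length) : row[row.length - 1 - jn]? ≠ some "1" := by
  intro hget
  have hrevget : row.reverse[jn]? = some "1" := by
    rw [List.getElem?_reverse hjn]
    exact hget
  have hle : row.reverse.idxOf "1" ≤ jn := pv_idxOf_le hrevget
  unfold pvTrN at h
  omega

theorem pvColA_iff (g : List (List String)) (jn : Nat)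
    (hlen : ∀ row ∈ g, jn + 1 ≤ row.length) :
    (column_has_char g (-(((jn : Nat) : Int) + 1)) "1" = true) ↔
      ∃ row ∈ g, row[row.length - 1 - jn]? = some "1" := by
  induction g with
  | nil => simp [column_has_char]
  | cons row t ih =>
    have hlenr : jn + 1 ≤ row.length := hlen row (by simp)
    have hget : PySem.List.pyGet? row (-(((jn : Nat) : Int) + 1)) = row[row.length - 1 - jn]? := by
      have hcast : (-(((jn : Nat) : Int) + 1)) = -(((jn + 1 : Nat) : Int)) := by push_cast; ring
      rw [hcast, PySem.List.pyGet?_neg_natCast row (jn + 1) (by omega) hlenr]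
      congr 1
      omega
    have hlen' : ∀ r ∈ t, jn + 1 ≤ r.length := fun r hr => hlen r (by simp [hr])
    by_cases hhit : row[row.length - 1 - jn]? = some "1"
    · simp only [column_has_char]
      rw [hget, if_pos hhit]
      exact ⟨fun _ => ⟨row, by simp, hhit⟩, fun _ => rfl⟩
    · simp only [column_has_char, hget, hhit, if_false]
      rw [ih hlen']
      simp [hhit]

theorem pvColA_of_mem {g : List (List String)} {j : Int} {row : List String}
    (hr : row ∈ g) (h : PySem.List.pyGet? row j = some "1") :
    column_has_char g j "1" = true := by
  induction g with
  | nil => simp at hr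
  | cons r t ih =>
    rcases List.mem_cons.mp hr with hhead | htail
    · subst hhead
      simp [column_has_char, h]
    · simp only [column_has_char]
      split_ifs with hcond
      · rfl
      · exact ih htail

theorem pvLoop_eq (g : List (List String)) (w : Nat) (jt : Nat)
    (hjt : jt ≤ w - 1) (hw : 1 ≤ w)
    (hub : ∀ jn : Nat, jn < jt → column_has_char g (-(((jn : Nat) : Int) + 1)) "1" = false)
    (hstop : (jt = w - 1 ∧ 0 < jt) ∨ column_has_char g (-(((jt : Nat) : Int) + 1)) "1" = true) :
    ∀ fuel j : Nat, j ≤ jt → (jt = w - 1 → 0 < jt → j < jt) → jt - j < fuel →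
      pvAWhile g (w : Int) fuel ((j : Nat) : Int) = ((jt : Nat) : Int) := by
  intro fuel
  induction fuel with
  | zero => intro j _ _ hf; omega
  | succ fuel ih =>
    intro j hj1 hj2 hf
    by_cases hjteq : j = jt
    · -- at the stopping column: it contains a '1', the loop stops
      have hcond : column_has_char g (-(((j : Nat) : Int) + 1)) "1" = true := by
        rcases hstop with ⟨hcap, hpos⟩ | hcond
        · exact absurd (hj2 hcap hpos) (by omega)
        · rw [hjteq]; exact hcond
      simp only [pvAWhile]
      rw [hcond]
      simp [hjteq]
    · -- left of the stopping column from the right: all blank, the loop advances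
      have hjlt : j < jt := by omega
      have hcond : column_has_char g (-(((j : Nat) : Int) + 1)) "1" = false := hub j hjlt
      simp only [pvAWhile]
      rw [hcond]
      rw [if_pos rfl]
      by_cases hbr : j + 2 = w
      · have hbri : (((j : Nat) : Int) + 1) + 1 = (w : Int) := by omega
        rw [if_pos hbri]
        omega
      · have hbri : ¬((((j : Nat) : Int) + 1) + 1 = (w : Int)) := by omega
        have hstep : (((j : Nat) : Int) + 1) = (((j + 1 : Nat) : Int)) := by push_cast; ring
        rw [if_neg hbri, hstep]
        exact ih (j + 1) (by omega) (by intro h1 h2; omega) (by omega)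

-- the per-grid value: A's while loop equals B's min(width-1, row trails) fold
theorem pvGrid_eq (g : List (List String)) (hg : pvGridPre g) :
    pvAWhile g (((g.headD []).length : Nat) : Int)
        ((((g.headD []).length : Nat) : Int).toNat + 1) 0 =
      (g.map pvTrail).foldl min ((((g.headD []).length : Nat) : Int) - 1) := by
  obtain ⟨hne, hcases⟩ := hg
  obtain ⟨r0, rest, rfl⟩ : ∃ r0 rest, g = r0 :: rest := by
    cases g with
    | nil => exact absurd rfl hne
    | cons r0 rest => exact ⟨r0, rest, rfl⟩
  set g : List (List String) := r0 :: rest with hgdef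
  set w : Nat := (g.headD []).length with hwdef
  set M : Nat := pvMinTr g with hMdef
  -- characterise M as the minimum of the rows' trailing runs
  have hMsome : PySem.List.min? (g.map pvTrN) (fun x => x) =
      some ((rest.map pvTrN).foldl min (pvTrN r0)) := by
    rw [hgdef, List.map_cons, PySem.List.min?_id_cons]
  have hMval : M = (rest.map pvTrN).foldl min (pvTrN r0) := by
    rw [hMdef, pvMinTr, hMsome]
    rfl
  have hMsome' : PySem.List.min? (g.map pvTrN) (fun x => x) = some M := by
    rw [hMsome, hMval]
  have hMle : ∀ row ∈ g, M ≤ pvTrN row := by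
    intro row hr
    exact PySem.List.min?_isMin hMsome' _ (List.mem_map_of_mem hr)
  have hMmem : ∃ row ∈ g, pvTrN row = M := by
    have := PySem.List.min?_mem hMsome'
    simpa using this
  have hw1 : 1 ≤ w := by
    rcases hcases with ⟨h2, _⟩ | ⟨h1, _, _⟩
    · omega
    · exact h1
  -- characterise B's fold as min(w-1, M)
  set T : Int := (g.map pvTrail).foldl min ((w : Int) - 1) with hTdef
  have hmin : PySem.List.min? (((w : Int) - 1) :: g.map pvTrail) (fun y => y) = some T := by
    rw [PySem.List.min?_id_cons]
  have hisMin : ∀ y ∈ ((w : Int) - 1) :: g.map pvTrail, T ≤ y :=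
    PySem.List.min?_isMin hmin
  have hTmem : T ∈ ((w : Int) - 1) :: g.map pvTrail := PySem.List.min?_mem hmin
  have hTcap : T ≤ (w : Int) - 1 := hisMin _ (by simp)
  have hTtrail : ∀ row ∈ g, T ≤ pvTrail row := fun row hr =>
    hisMin _ (by simp; right; exact ⟨row, hr, rfl⟩)
  have hTM : T = min ((w : Int) - 1) ((M : Nat) : Int) := by
    apply le_antisymm
    · apply le_min hTcap
      obtain ⟨row, hr, hrw0⟩ := hMmem
      calc T ≤ pvTrail row := hTtrail row hr
        _ = ((pvTrN row : Nat) : Int) := pvTrail_eq_trN row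
        _ = ((M : Nat) : Int) := by rw [hrw0]
    · rcases List.mem_cons.mp hTmem with hcap | hmem
      · rw [hcap]; exact min_le_left _ _
      · obtain ⟨row, hr, hrv⟩ := List.mem_map.mp hmem
        rw [← hrv, pvTrail_eq_trN row]
        have := hMle row hr
        have hle : ((M : Nat) : Int) ≤ ((pvTrN row : Nat) : Int) := by exact_mod_cast this
        exact le_trans (min_le_right _ _) hle
  set jt : Nat := min (w - 1) M with hjtdef
  have hjtT : ((jt : Nat) : Int) = T := by
    rw [hTM, hjtdef]
    push_cast [Nat.cast_min]
    omega
  have hjtw : jt ≤ w - 1 := min_le_left _ _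
  have hub : ∀ jn : Nat, jn < jt →
      column_has_char g (-(((jn : Nat) : Int) + 1)) "1" = false := by
    intro jn hjn
    have hjnM : jn < M := by omega
    have hlen : ∀ row ∈ g, jn + 1 ≤ row.length := by
      intro row hr
      have h1 := hMle row hr
      have h2 := pvTrN_le_length row
      omega
    rw [← Bool.not_eq_true, pvColA_iff g jn hlen]
    rintro ⟨row, hr, hget⟩
    have h1 : jn < pvTrN row := by
      have := hMle row hr
      omega
    have h2 : jn < row.length := by
      have := hlen row hr
      omega
    exact pvTrN_ub h1 h2 hget
  have hstop : (jt = w - 1 ∧ 0 < jt) ∨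
      column_has_char g (-(((jt : Nat) : Int) + 1)) "1" = true := by
    rcases hcases with ⟨h2, hma⟩ | ⟨h1, hmb, hfind⟩
    · left
      constructor
      · omega
      · omega
    · right
      have hjtM : jt = M := by omega
      obtain ⟨row, hf⟩ : ∃ row, g.find? (fun r => pvTrN r == pvMinTr g) = some row := by
        cases hf : g.find? (fun r => pvTrN r == pvMinTr g) with
        | none =>
          rw [pvFindOk, hf] at hfind
          simp at hfind
        | some row => exact ⟨row, rfl⟩
      have hmemr : row ∈ g := List.mem_of_find?_eq_some hf
      have hpred : pvTrN row = M := by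
        have := List.find?_some hf
        simpa [hMdef] using this
      have hlenr : M < row.length := by
        rw [pvFindOk, hf] at hfind
        simpa [hMdef] using hfind
      apply pvColA_of_mem hmemr
      have hcast : (-(((jt : Nat) : Int) + 1)) = -(((M + 1 : Nat) : Int)) := by
        rw [hjtM]; push_cast; ring
      rw [hcast, PySem.List.pyGet?_neg_natCast row (M + 1) (by omega) (by omega)]
      have hidx : row.length - (M + 1) = row.length - 1 - pvTrN row := by omega
      rw [hidx]
      exact pvTrN_get (by omega)
  have hfuel : (((w : Nat) : Int)).toNat + 1 = w + 1 := by simp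
  rw [show ((0 : Int)) = (((0 : Nat) : Int)) by simp, hfuel]
  rw [pvLoop_eq g w jt hjtw hw1 hub hstop (w + 1) 0 (by omega) (by omega) (by omega)]
  exact hjtT

theorem pvOuter (char : List (List (List String))) (hpre : ∀ g ∈ char, pvGridPre g) :
    ∀ (k : Nat) (b : Int), k ≠ 0 →
      pvAGo char k b = (char.foldl pvBStep (some b)).getD (-1) := by
  induction char with
  | nil => intro k b _; simp [pvAGo]
  | cons g t ih =>
    intro k b hk
    have hg : pvGridPre g := hpre g (by simp)
    have ht : ∀ g' ∈ t, pvGridPre g' := fun g' hg' => hpre g' (by simp [hg'])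
    simp only [pvAGo, List.foldl_cons]
    rw [pvGrid_eq g hg]
    set tv : Int := (g.map pvTrail).foldl min ((((g.headD []).length : Nat) : Int) - 1) with htv
    rw [if_neg hk]
    have hmin : (if b > tv then tv else b) = min b tv := by
      rcases le_or_gt b tv with h | h
      · rw [if_neg (by omega), min_eq_left h]
      · rw [if_pos h, min_eq_right (by omega)]
    rw [hmin]
    have hstep : pvBStep (some b) g = some (min b tv) := by
      simp [pvBStep, htv]
    rw [hstep]
    exact ih ht (k + 1) (min b tv) (by omega)

-- ===== VERDICT (by name: the statement is the Claim_ definition above) =====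
theorem j_index_of_right_column_to_delete_spec : Claim_equal_j_index_of_right_column_to_delete := by
  intro char _ hpre
  unfold Spec_j_index_of_right_column_to_delete
  unfold j_index_of_right_column_to_delete j_index_of_right_column_to_delete_alt
  cases char with
  | nil => rfl
  | cons g t =>
    have hg : pvGridPre g := hpre g (by simp)
    have ht : ∀ g' ∈ t, pvGridPre g' := fun g' hg' => hpre g' (by simp [hg'])
    have h0 : pvAGo (g :: t) 0 (-1) =
        pvAGo t 1 (pvAWhile g (((g.headD []).length : Int))
          ((((g.headD []).length : Int)).toNat + 1) 0) := by
      simp [pvAGo]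
    rw [h0, pvGrid_eq g hg, List.foldl_cons]
    have hstep : pvBStep none g =
        some ((g.map pvTrail).foldl min ((((g.headD []).length : Nat) : Int) - 1)) := rfl
    rw [hstep]
    exact pvOuter t ht 1 _ (by omega)
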